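-- pv_equiv track=rewrite | github.com/nguyenchiemminhvu/DSA | Problems/Leetcode/MaximizeTheConfusionOfAnExam/solve.py | maxConsecutiveAnswers
-- ===== SOURCE A (Python) =====
-- def maxConsecutiveAnswers(keys: str, k: int) -> int:
--     n = len(keys)
--     res = 0
--     count_t = 0
--     count_f = 0
--     l = 0
--     for r in range(n):
--         if keys[r] == 'T':
--             count_t += 1
--         else:
--             count_f += 1
--
--         while min(count_t, count_f) > k:
--             if keys[l] == 'T':
--                 count_t -= 1
--             else:
--                 count_f -= 1
--             l += 1
--
--         if min(count_t, count_f) <= k: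
--             res = max(res, r - l + 1)
--
--     return res
-- ===== SOURCE B (Python) =====
-- def maxConsecutiveAnswers(keys: str, k: int) -> int:
--     # Two independent sliding-window passes, each with a single scalar count
--     # of the characters charged against the budget k, instead of one combined
--     # pass tracking both counts with a min() condition.
--     def longest(counted):
--         cnt = 0
--         l = 0
--         best = 0
--         for r in range(len(keys)):
--             if counted(keys[r]):
--                 cnt += 1
--             while cnt > k:
--                 if counted(keys[l]):
--                     cnt -= 1
--                 l += 1
--             best = max(best, r - l + 1)
--         return best
--     return max(longest(lambda ch: ch == 'T'),
--                longest(lambda ch: ch != 'T'))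
-- ===== Notes on version B (the rewrite author's own statement) =====
-- stated objective: alternative
-- what changed: Replaces the single combined sliding window that tracks both count_t and count_f under a min(count_t,count_f)>k condition with two independent sliding-window passes (one charging 'T' characters against k, one charging non-'T' characters), each maintaining a single scalar count with a plain cnt>k shrink, returning the larger of the two window maxima.
import Mathlib
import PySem

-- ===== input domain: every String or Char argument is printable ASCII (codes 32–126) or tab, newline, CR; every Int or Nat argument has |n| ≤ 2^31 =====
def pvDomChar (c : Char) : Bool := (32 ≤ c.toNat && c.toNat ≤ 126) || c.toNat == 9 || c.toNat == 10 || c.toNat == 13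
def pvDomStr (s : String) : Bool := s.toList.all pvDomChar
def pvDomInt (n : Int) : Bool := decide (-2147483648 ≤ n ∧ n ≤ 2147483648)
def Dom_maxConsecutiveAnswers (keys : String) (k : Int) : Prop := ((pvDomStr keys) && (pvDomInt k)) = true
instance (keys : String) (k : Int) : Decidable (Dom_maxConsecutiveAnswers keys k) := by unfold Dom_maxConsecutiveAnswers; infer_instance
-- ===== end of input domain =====

-- B replaces A's single combined sliding window (two counts, min(count_t,count_f) > k shrink)
-- by two independent one-count sliding-window passes (charging 'T' resp. non-'T' characters
-- against k) and returns the larger maximum; alternative decomposition, same O(n) cost.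

-- ===== PORT A =====
-- inner `while min(count_t, count_f) > k` loop; fuel only guards totality (never exhausted
-- when the Python loop terminates), `none` from cs[l]? is Python's IndexError (outside Pre_)
def shrinkA (cs : List Char) (k : Int) : Nat → Int → Int → Nat → Int × Int × Nat
  | 0, cT, cF, l => (cT, cF, l)
  | fuel+1, cT, cF, l =>
    if min cT cF > k then
      match cs[l]? with
      | none => (cT, cF, l)
      | some ch => if ch = 'T' then shrinkA cs k fuel (cT-1) cF (l+1)
                   else shrinkA cs k fuel cT (cF-1) (l+1)
    else (cT, cF, l)

-- one iteration of A's `for r in range(n)` body; r < n so cs[r]? is always some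
def stepA (cs : List Char) (k : Int) (st : Int × Int × Int × Nat) (r : Nat) : Int × Int × Int × Nat :=
  let (res, cT, cF, l) := st
  let (cT, cF) := match cs[r]? with
    | some ch => if ch = 'T' then (cT+1, cF) else (cT, cF+1)
    | none => (cT, cF)
  let (cT, cF, l) := shrinkA cs k (cs.length+1) cT cF l
  let res := if min cT cF ≤ k then max res ((r:Int) - (l:Int) + 1) else res
  (res, cT, cF, l)

def maxConsecutiveAnswers (keys : String) (k : Int) : Int :=
  ((List.range keys.toList.length).foldl (stepA keys.toList k) (0, 0, 0, 0)).1

-- ===== PORT B =====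
-- inner `while cnt > k` loop of the helper `longest`; fuel as in shrinkA
def shrinkB (cs : List Char) (p : Char → Bool) (k : Int) : Nat → Int → Nat → Int × Nat
  | 0, cnt, l => (cnt, l)
  | fuel+1, cnt, l =>
    if cnt > k then
      match cs[l]? with
      | none => (cnt, l)
      | some ch => shrinkB cs p k fuel (if p ch then cnt - 1 else cnt) (l+1)
    else (cnt, l)

-- one iteration of `longest`'s `for r in range(len(keys))` body
def stepB (cs : List Char) (p : Char → Bool) (k : Int) (st : Int × Int × Nat) (r : Nat) : Int × Int × Nat :=
  let (best, cnt, l) := st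
  let cnt := match cs[r]? with
    | some ch => if p ch then cnt + 1 else cnt
    | none => cnt
  let (cnt, l) := shrinkB cs p k (cs.length+1) cnt l
  (max best ((r:Int) - (l:Int) + 1), cnt, l)

-- helper `longest(counted)` of Source B
def longestB (cs : List Char) (p : Char → Bool) (k : Int) : Int :=
  ((List.range cs.length).foldl (stepB cs p k) (0, 0, 0)).1

-- the two lambdas passed to `longest` in Source B
def pT : Char → Bool := fun ch => ch == 'T'
def pF : Char → Bool := fun ch => ch != 'T'

def maxConsecutiveAnswers_alt (keys : String) (k : Int) : Int :=
  max (longestB keys.toList pT k) (longestB keys.toList pF k)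

-- ===== PRECONDITION & SPEC =====
-- Pre_ excludes k < 0 with nonempty keys: there Python A (and B) raises IndexError
-- (the shrink loop walks l past the end of keys).
def Pre_maxConsecutiveAnswers (keys : String) (k : Int) : Prop := 0 ≤ k ∨ keys = ""
instance (keys : String) (k : Int) : Decidable (Pre_maxConsecutiveAnswers keys k) := by
  unfold Pre_maxConsecutiveAnswers; infer_instance

def pvWitness_maxConsecutiveAnswers : String × Int := ("TTFFT", 1)

def Spec_maxConsecutiveAnswers (keys : String) (k : Int) (out : Int) : Prop := out = maxConsecutiveAnswers_alt keys k
instance (keys : String) (k : Int) (out : Int) : Decidable (Spec_maxConsecutiveAnswers keys k out) := by unfold Spec_maxConsecutiveAnswers; infer_instance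

-- ===== CLAIM (what is proved, stated in full; the proofs are below) =====
def Claim_equal_maxConsecutiveAnswers : Prop := ∀ (keys : String) (k : Int), Dom_maxConsecutiveAnswers keys k → Pre_maxConsecutiveAnswers keys k → Spec_maxConsecutiveAnswers keys k (maxConsecutiveAnswers keys k)

-- ===== LEMMAS AND PROOFS =====

-- number of characters of cs with index in [a, b) satisfying p
def wcnt (cs : List Char) (p : Char → Bool) (a b : Nat) : Nat :=
  ((cs.take b).drop a).countP p

-- window [l, r] of cs is valid for predicate p and budget k
def validW (cs : List Char) (p : Char → Bool) (k : Int) (r l : Nat) : Bool :=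
  decide ((wcnt cs p l (r+1) : Int) ≤ k)

-- leftmost l with the window [l, r] valid (the `∨ l = r+1` disjunct only
-- guarantees existence; for 0 ≤ k it is itself a valid window)
def sMin (cs : List Char) (p : Char → Bool) (k : Int) (r : Nat) : Nat :=
  Nat.find (p := fun l => validW cs p k r l = true ∨ l = r+1) ⟨r+1, Or.inr rfl⟩

theorem wcnt_of_ge (cs : List Char) (p : Char → Bool) {a b : Nat} (h : b ≤ a) :
    wcnt cs p a b = 0 := by
  have hl : (cs.take b).length ≤ a := by
    simp [List.length_take]; omega
  simp [wcnt, List.drop_eq_nil_of_le hl]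

theorem wcnt_right_succ (cs : List Char) (p : Char → Bool) {a b : Nat}
    (hab : a ≤ b) (hb : b < cs.length) :
    wcnt cs p a (b+1) = wcnt cs p a b + (if p cs[b] then 1 else 0) := by
  have hlen : a ≤ (cs.take b).length := by simp [List.length_take]; omega
  rw [wcnt, List.take_add_one, List.getElem?_eq_getElem hb,
      List.drop_append_of_le_length hlen, List.countP_append]
  simp [wcnt]

theorem wcnt_left_succ (cs : List Char) (p : Char → Bool) {a b : Nat}
    (hab : a < b) (ha : a < cs.length) :
    wcnt cs p a b = (if p cs[a] then 1 else 0) + wcnt cs p (a+1) b := by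
  have hlen : a < (cs.take b).length := by simp [List.length_take]; omega
  rw [wcnt, List.drop_eq_getElem_cons hlen, List.countP_cons]
  have : (cs.take b)[a] = cs[a] := List.getElem_take
  rw [this, wcnt]
  by_cases h : p cs[a]
  · simp [h]; omega
  · simp [h]

theorem wcnt_mono_right (cs : List Char) (p : Char → Bool) (a b : Nat) :
    wcnt cs p a b ≤ wcnt cs p a (b+1) := by
  by_cases hb : b < cs.length
  · by_cases hab : a ≤ b
    · rw [wcnt_right_succ cs p hab hb]; omega
    · rw [wcnt_of_ge cs p (by omega)]; omega
  · unfold wcnt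
    rw [List.take_of_length_le (by omega), List.take_of_length_le (by omega)]


theorem valid_top (cs : List Char) (p : Char → Bool) {k : Int} (hk : 0 ≤ k) (r : Nat) :
    validW cs p k r (r+1) = true := by
  simp [validW, wcnt_of_ge cs p (le_refl (r+1))]; exact hk

theorem valid_of_succ (cs : List Char) (p : Char → Bool) (k : Int) (r : Nat) {l : Nat}
    (h : validW cs p k (r+1) l = true) : validW cs p k r l = true := by
  simp [validW] at h ⊢
  exact le_trans (Int.ofNat_le.2 (wcnt_mono_right cs p l (r+1))) h

theorem sMin_le_succ (cs : List Char) (p : Char → Bool) (k : Int) (r : Nat) :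
    sMin cs p k r ≤ r + 1 := Nat.find_le (Or.inr rfl)

theorem sMin_valid (cs : List Char) (p : Char → Bool) {k : Int} (hk : 0 ≤ k) (r : Nat) :
    validW cs p k r (sMin cs p k r) = true := by
  rcases Nat.find_spec (p := fun l => validW cs p k r l = true ∨ l = r+1) ⟨r+1, Or.inr rfl⟩ with h | h
  · exact h
  · rw [sMin, h]; exact valid_top cs p hk r

theorem sMin_le_of_valid (cs : List Char) (p : Char → Bool) (k : Int) (r : Nat) {l : Nat}
    (h : validW cs p k r l = true) : sMin cs p k r ≤ l := Nat.find_le (Or.inl h)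

theorem sMin_mono (cs : List Char) (p : Char → Bool) (k : Int) (r : Nat) :
    sMin cs p k r ≤ sMin cs p k (r+1) := by
  rcases Nat.find_spec (p := fun l => validW cs p k (r+1) l = true ∨ l = r+2) ⟨r+2, Or.inr rfl⟩ with h | h
  · exact sMin_le_of_valid cs p k r (valid_of_succ cs p k r h)
  · have hx : sMin cs p k (r+1) = r + 2 := h
    rw [hx]; exact le_trans (sMin_le_succ cs p k r) (by omega)

theorem shrinkB_spec (cs : List Char) (p : Char → Bool) {k : Int} (hk : 0 ≤ k) (r : Nat)
    (hr : r < cs.length) :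
    ∀ (fuel l : Nat) (c : Int), c = (wcnt cs p l (r+1) : Int) → l ≤ sMin cs p k r →
      r + 2 - l ≤ fuel →
      shrinkB cs p k fuel c l = ((wcnt cs p (sMin cs p k r) (r+1) : Int), sMin cs p k r) := by
  intro fuel
  induction fuel with
  | zero =>
    intro l c hc hls hf
    have := sMin_le_succ cs p k r
    omega
  | succ fuel ih =>
    intro l c hc hls hf
    by_cases hck : c > k
    · have hval : ¬ validW cs p k r l = true := by
        subst hc; simp [validW]; omega
      have hne : l ≠ sMin cs p k r := by
        intro he; rw [he] at hval; exact hval (sMin_valid cs p hk r)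
      have hlt : l < sMin cs p k r := lt_of_le_of_ne hls hne
      have hlr : l < r + 1 := lt_of_lt_of_le hlt (sMin_le_succ cs p k r)
      have hllen : l < cs.length := by omega
      have hget : cs[l]? = some cs[l] := List.getElem?_eq_getElem hllen
      have hstep : (if p cs[l] then c - 1 else c) = (wcnt cs p (l+1) (r+1) : Int) := by
        subst hc
        have := wcnt_left_succ cs p (a := l) (b := r+1) hlr hllen
        by_cases h : p cs[l] <;> simp [h] at this ⊢ <;> omega
      rw [shrinkB, if_pos hck, hget]
      exact ih (l+1) _ hstep (by omega) (by omega)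
    · have hval : validW cs p k r l = true := by
        subst hc; simp [validW]; omega
      have : l = sMin cs p k r := le_antisymm hls (sMin_le_of_valid cs p k r hval)
      rw [shrinkB, if_neg hck, hc, this]

-- A's combined window condition min(count_t, count_f) ≤ k
def validA (cs : List Char) (k : Int) (r l : Nat) : Bool :=
  decide (min ((wcnt cs pT l (r+1) : Int)) ((wcnt cs pF l (r+1) : Int)) ≤ k)

def sA (cs : List Char) (k : Int) (r : Nat) : Nat :=
  Nat.find (p := fun l => validA cs k r l = true ∨ l = r+1) ⟨r+1, Or.inr rfl⟩

theorem validA_iff (cs : List Char) (k : Int) (r l : Nat) :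
    validA cs k r l = true ↔ (validW cs pT k r l = true ∨ validW cs pF k r l = true) := by
  simp [validA, validW]

theorem sA_le_succ (cs : List Char) (k : Int) (r : Nat) : sA cs k r ≤ r + 1 :=
  Nat.find_le (Or.inr rfl)

theorem sA_valid (cs : List Char) {k : Int} (hk : 0 ≤ k) (r : Nat) :
    validA cs k r (sA cs k r) = true := by
  rcases Nat.find_spec (p := fun l => validA cs k r l = true ∨ l = r+1) ⟨r+1, Or.inr rfl⟩ with h | h
  · exact h
  · rw [sA, h, validA_iff]; exact Or.inl (valid_top cs pT hk r)

theorem sA_le_of_valid (cs : List Char) (k : Int) (r : Nat) {l : Nat}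
    (h : validA cs k r l = true) : sA cs k r ≤ l := Nat.find_le (Or.inl h)

theorem sA_eq_min (cs : List Char) (k : Int) (r : Nat) :
    sA cs k r = min (sMin cs pT k r) (sMin cs pF k r) := by
  apply le_antisymm
  · apply le_min
    · rcases Nat.find_spec (p := fun l => validW cs pT k r l = true ∨ l = r+1)
        ⟨r+1, Or.inr rfl⟩ with h | h
      · exact sA_le_of_valid cs k r ((validA_iff cs k r _).2 (Or.inl h))
      · rw [sMin, h]; exact sA_le_succ cs k r
    · rcases Nat.find_spec (p := fun l => validW cs pF k r l = true ∨ l = r+1)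
        ⟨r+1, Or.inr rfl⟩ with h | h
      · exact sA_le_of_valid cs k r ((validA_iff cs k r _).2 (Or.inr h))
      · rw [sMin, h]; exact sA_le_succ cs k r
  · rcases Nat.find_spec (p := fun l => validA cs k r l = true ∨ l = r+1)
      ⟨r+1, Or.inr rfl⟩ with h | h
    · rcases (validA_iff cs k r _).1 h with h' | h'
      · exact le_trans (min_le_left _ _) (sMin_le_of_valid cs pT k r h')
      · exact le_trans (min_le_right _ _) (sMin_le_of_valid cs pF k r h')
    · rw [sA, h]
      exact le_trans (min_le_left _ _) (sMin_le_succ cs pT k r)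

theorem shrinkA_spec (cs : List Char) {k : Int} (hk : 0 ≤ k) (r : Nat)
    (hr : r < cs.length) :
    ∀ (fuel l : Nat) (c₁ c₂ : Int), c₁ = (wcnt cs pT l (r+1) : Int) →
      c₂ = (wcnt cs pF l (r+1) : Int) → l ≤ sA cs k r → r + 2 - l ≤ fuel →
      shrinkA cs k fuel c₁ c₂ l =
        ((wcnt cs pT (sA cs k r) (r+1) : Int), (wcnt cs pF (sA cs k r) (r+1) : Int), sA cs k r) := by
  intro fuel
  induction fuel with
  | zero =>
    intro l c₁ c₂ hc₁ hc₂ hls hf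
    have := sA_le_succ cs k r
    omega
  | succ fuel ih =>
    intro l c₁ c₂ hc₁ hc₂ hls hf
    by_cases hck : min c₁ c₂ > k
    · have hval : ¬ validA cs k r l = true := by
        subst hc₁; subst hc₂; simp [validA]; omega
      have hne : l ≠ sA cs k r := by
        intro he; rw [he] at hval; exact hval (sA_valid cs hk r)
      have hlt : l < sA cs k r := lt_of_le_of_ne hls hne
      have hlr : l < r + 1 := lt_of_lt_of_le hlt (sA_le_succ cs k r)
      have hllen : l < cs.length := by omega
      have hget : cs[l]? = some cs[l] := List.getElem?_eq_getElem hllen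
      have hT := wcnt_left_succ cs pT (a := l) (b := r+1) hlr hllen
      have hF := wcnt_left_succ cs pF (a := l) (b := r+1) hlr hllen
      rw [shrinkA, if_pos hck, hget]
      show (if cs[l] = 'T' then shrinkA cs k fuel (c₁-1) c₂ (l+1)
            else shrinkA cs k fuel c₁ (c₂-1) (l+1)) = _
      by_cases hch : cs[l] = 'T'
      · have hpT : pT cs[l] = true := by simp [pT, hch]
        have hpF : pF cs[l] = false := by simp [pF, hch]
        rw [if_pos hch]
        apply ih (l+1) _ _ ?_ ?_ (by omega) (by omega)
        · rw [hpT] at hT; simp at hT; omega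
        · rw [hpF] at hF; simp at hF; omega
      · have hpT : pT cs[l] = false := by simp [pT, hch]
        have hpF : pF cs[l] = true := by simp [pF, hch]
        rw [if_neg hch]
        apply ih (l+1) _ _ ?_ ?_ (by omega) (by omega)
        · rw [hpT] at hT; simp at hT; omega
        · rw [hpF] at hF; simp at hF; omega
    · have hval : validA cs k r l = true := by
        subst hc₁; subst hc₂; simp [validA]; omega
      have : l = sA cs k r := le_antisymm hls (sA_le_of_valid cs k r hval)
      rw [shrinkA, if_neg hck, hc₁, hc₂, this]

-- pointer position before processing index r (0 for r = 0, else the minimum after r-1)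
def Sp (cs : List Char) (p : Char → Bool) (k : Int) : Nat → Nat
  | 0 => 0
  | r+1 => sMin cs p k r

def SAn (cs : List Char) (k : Int) : Nat → Nat
  | 0 => 0
  | r+1 => sA cs k r

-- running maximum of a pass after processing the first r indices
def bestR (cs : List Char) (p : Char → Bool) (k : Int) : Nat → Int
  | 0 => 0
  | r+1 => max (bestR cs p k r) ((r : Int) - (sMin cs p k r : Int) + 1)

theorem Sp_le (cs : List Char) (p : Char → Bool) (k : Int) (r : Nat) : Sp cs p k r ≤ r := by
  cases r with
  | zero => exact le_refl 0
  | succ r => exact sMin_le_succ cs p k r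

theorem Sp_le_sMin (cs : List Char) (p : Char → Bool) (k : Int) (r : Nat) :
    Sp cs p k r ≤ sMin cs p k r := by
  cases r with
  | zero => exact Nat.zero_le _
  | succ r => exact sMin_mono cs p k r

theorem SAn_le (cs : List Char) (k : Int) (r : Nat) : SAn cs k r ≤ r := by
  cases r with
  | zero => exact le_refl 0
  | succ r => exact sA_le_succ cs k r

theorem SAn_le_sA (cs : List Char) (k : Int) (r : Nat) : SAn cs k r ≤ sA cs k r := by
  cases r with
  | zero => exact Nat.zero_le _
  | succ r =>
    rw [SAn, sA_eq_min, sA_eq_min]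
    exact min_le_min (sMin_mono cs pT k r) (sMin_mono cs pF k r)

theorem passB_inv (cs : List Char) (p : Char → Bool) {k : Int} (hk : 0 ≤ k) :
    ∀ r, r ≤ cs.length →
      (List.range r).foldl (stepB cs p k) (0, 0, 0) =
        (bestR cs p k r, (wcnt cs p (Sp cs p k r) r : Int), Sp cs p k r) := by
  intro r
  induction r with
  | zero => intro _; simp [bestR, Sp, wcnt]
  | succ r ih =>
    intro hr
    have hrlen : r < cs.length := by omega
    rw [List.range_succ, List.foldl_append, ih (by omega)]
    have hget : cs[r]? = some cs[r] := List.getElem?_eq_getElem hrlen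
    have hstep : (if p cs[r] then (wcnt cs p (Sp cs p k r) r : Int) + 1
                  else (wcnt cs p (Sp cs p k r) r : Int))
        = (wcnt cs p (Sp cs p k r) (r+1) : Int) := by
      have := wcnt_right_succ cs p (Sp_le cs p k r) hrlen
      by_cases h : p cs[r] <;> simp [h] at this ⊢ <;> omega
    have hshrink := shrinkB_spec cs p hk r hrlen (cs.length + 1) (Sp cs p k r) _
      hstep (Sp_le_sMin cs p k r) (by have := Sp_le cs p k r; omega)
    simp only [List.foldl_cons, List.foldl_nil, stepB, hget, hshrink]
    rfl

theorem passA_inv (cs : List Char) {k : Int} (hk : 0 ≤ k) :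
    ∀ r, r ≤ cs.length →
      (List.range r).foldl (stepA cs k) (0, 0, 0, 0) =
        (max (bestR cs pT k r) (bestR cs pF k r),
         (wcnt cs pT (SAn cs k r) r : Int), (wcnt cs pF (SAn cs k r) r : Int), SAn cs k r) := by
  intro r
  induction r with
  | zero => intro _; simp [bestR, SAn, wcnt]
  | succ r ih =>
    intro hr
    have hrlen : r < cs.length := by omega
    rw [List.range_succ, List.foldl_append, ih (by omega)]
    have hget : cs[r]? = some cs[r] := List.getElem?_eq_getElem hrlen
    have hT := wcnt_right_succ cs pT (SAn_le cs k r) hrlen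
    have hF := wcnt_right_succ cs pF (SAn_le cs k r) hrlen
    have hstep : (if cs[r] = 'T'
          then ((wcnt cs pT (SAn cs k r) r : Int) + 1, (wcnt cs pF (SAn cs k r) r : Int))
          else ((wcnt cs pT (SAn cs k r) r : Int), (wcnt cs pF (SAn cs k r) r : Int) + 1))
        = ((wcnt cs pT (SAn cs k r) (r+1) : Int), (wcnt cs pF (SAn cs k r) (r+1) : Int)) := by
      by_cases h : cs[r] = 'T'
      · have h1 : pT cs[r] = true := by simp [pT, h]
        have h2 : pF cs[r] = false := by simp [pF, h]
        rw [h1] at hT; rw [h2] at hF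
        simp [h] at hT hF ⊢
        constructor <;> omega
      · have h1 : pT cs[r] = false := by simp [pT, h]
        have h2 : pF cs[r] = true := by simp [pF, h]
        rw [h1] at hT; rw [h2] at hF
        simp [h] at hT hF ⊢
        constructor <;> omega
    have hshrink := shrinkA_spec cs hk r hrlen (cs.length + 1) (SAn cs k r) _ _
      (congrArg Prod.fst hstep) (congrArg Prod.snd hstep)
      (SAn_le_sA cs k r) (by have := SAn_le cs k r; omega)
    have hg : min ((wcnt cs pT (sA cs k r) (r+1) : Int)) ((wcnt cs pF (sA cs k r) (r+1) : Int)) ≤ k := by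
      have := sA_valid cs hk r
      simp [validA] at this
      exact min_le_iff.2 this
    have hres : max (max (bestR cs pT k r) (bestR cs pF k r)) ((r : Int) - (sA cs k r : Int) + 1)
        = max (bestR cs pT k (r+1)) (bestR cs pF k (r+1)) := by
      rw [bestR, bestR, sA_eq_min]
      push_cast
      omega
    simp only [List.foldl_cons, List.foldl_nil, stepA, hget]
    by_cases h : cs[r] = 'T'
    · simp only [if_pos h] at hshrink ⊢
      try dsimp only at hshrink
      rw [hshrink]
      try dsimp only
      rw [if_pos hg]
      simp [SAn, hres]
    · simp only [if_neg h] at hshrink ⊢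
      try dsimp only at hshrink
      rw [hshrink]
      try dsimp only
      rw [if_pos hg]
      simp [SAn, hres]

-- ===== VERDICT (by name: the statement is the Claim_ definition above) =====
theorem maxConsecutiveAnswers_spec : Claim_equal_maxConsecutiveAnswers := by
  intro keys k _ hpre
  unfold Spec_maxConsecutiveAnswers
  rcases hpre with hk | hemp
  · unfold maxConsecutiveAnswers maxConsecutiveAnswers_alt longestB
    rw [passA_inv keys.toList hk keys.toList.length (le_refl _),
        passB_inv keys.toList pT hk keys.toList.length (le_refl _),
        passB_inv keys.toList pF hk keys.toList.length (le_refl _)]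
  · subst hemp
    simp [maxConsecutiveAnswers, maxConsecutiveAnswers_alt, longestB]
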